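-- pv_equiv track=rewrite | github.com/StateraSolutions/avenlis-sandstrike | sandstrike/redteam/encoders.py | encode_zero_width
-- ===== SOURCE A (Python) =====
-- def encode_zero_width(text: str) -> str:
--     """Insert zero-width characters."""
--     try:
--         zero_width_chars = ['\u200b', '\u200c', '\u200d', '\u2060', '\ufeff']
--         result = ""
--         for char in text:
--             result += char
--             if char != ' ':  # Don't add after spaces
--                 result += '\u200b'  # Zero-width space
--         return result
--     except Exception:
--         return text
-- ===== SOURCE B (Python) =====
-- import re
--
-- def encode_zero_width(text: str) -> str:
--     """Insert zero-width characters."""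
--     try:
--         return re.sub(r'[^ ]', lambda m: m.group() + '\u200b', text)
--     except Exception:
--         return text
-- ===== Notes on version B (the rewrite author's own statement) =====
-- stated objective: idiomatic
-- what changed: Replaced the explicit character loop with string concatenation by a single regex substitution that appends a zero-width space after every non-space character.
import Mathlib
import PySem

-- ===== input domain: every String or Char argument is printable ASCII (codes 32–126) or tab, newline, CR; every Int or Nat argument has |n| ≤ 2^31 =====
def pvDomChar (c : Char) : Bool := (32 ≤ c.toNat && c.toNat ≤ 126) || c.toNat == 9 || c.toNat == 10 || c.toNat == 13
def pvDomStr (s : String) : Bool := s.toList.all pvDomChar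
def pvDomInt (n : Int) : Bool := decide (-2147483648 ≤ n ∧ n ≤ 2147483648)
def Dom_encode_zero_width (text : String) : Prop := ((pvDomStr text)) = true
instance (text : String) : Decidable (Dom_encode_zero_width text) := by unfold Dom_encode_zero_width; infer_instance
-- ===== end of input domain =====

-- B replaces A's explicit accumulating loop with a single regex substitution appending '\u200b' after each non-space character (idiomatic; same cost).

-- ===== PORT A =====
-- A: result = ""; for char in text: result += char; if char != ' ': result += '\u200b'
def encode_zero_width (text : String) : String :=
  String.mk (text.toList.foldl
    (fun result char =>
      let result := result ++ [char]
      if char ≠ ' ' then result ++ ['\u200b'] else result) [])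

-- ===== PORT B =====
-- B: re.sub(r'[^ ]', lambda m: m.group() + '\u200b', text). Ported by hand (no regex
-- primitive in PySem): the engine scans the string once; each non-space character is a
-- match and is replaced by itself followed by '\u200b'; unmatched characters (spaces)
-- are copied through. Exact on all inputs.
def encode_zero_width_alt (text : String) : String :=
  String.mk (text.toList.flatMap
    (fun c => if c = ' ' then [c] else [c, '\u200b']))

-- ===== PRECONDITION & SPEC =====
def Spec_encode_zero_width (text : String) (out : String) : Prop := out = encode_zero_width_alt text
instance (text : String) (out : String) : Decidable (Spec_encode_zero_width text out) := by unfold Spec_encode_zero_width; infer_instance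

-- ===== CLAIM (what is proved, stated in full; the proofs are below) =====
def Claim_equal_encode_zero_width : Prop := ∀ (text : String), Dom_encode_zero_width text → Spec_encode_zero_width text (encode_zero_width text)

-- ===== LEMMAS AND PROOFS =====
theorem encode_zero_width_foldl_eq (l : List Char) (acc : List Char) :
    l.foldl (fun result char =>
      let result := result ++ [char]
      if char ≠ ' ' then result ++ ['\u200b'] else result) acc
      = acc ++ l.flatMap (fun c => if c = ' ' then [c] else [c, '\u200b']) := by
  induction l generalizing acc with
  | nil => simp
  | cons c rest ih =>
    simp only [List.foldl_cons, List.flatMap_cons, ih]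
    by_cases h : c = ' ' <;> simp [h]

-- ===== VERDICT (by name: the statement is the Claim_ definition above) =====
theorem encode_zero_width_spec : Claim_equal_encode_zero_width := by
  intro text _
  unfold Spec_encode_zero_width encode_zero_width encode_zero_width_alt
  rw [encode_zero_width_foldl_eq]
  simp
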